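-- pv_equiv track=rewrite | github.com/0xStryK3R/Scaler-DSA-Revision | python/Day-22/CW_2.py | solve
-- ===== SOURCE A (Python) =====
-- def solve(A):
--     MOD = 10**9 + 7
--
--     N = len(A)
--     A.sort()
--
--     ans = 0
--
--     for i in range(N):
--         num = A[i]
--         max_in = (2**i) % MOD
--         min_in = (2 ** (N - 1 - i)) % MOD
--         ans = (ans + (max_in - min_in) * num) % MOD
--
--     return ans
-- ===== SOURCE B (Python) =====
-- def solve(A):
--     MOD = 10**9 + 7
--     A.sort()
--     ans = 0
--     for hi, lo in zip(reversed(A), A):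
--         ans = (2 * ans + hi - lo) % MOD
--     return ans
-- ===== Notes on version B (the rewrite author's own statement) =====
-- stated objective: faster
-- what changed: Replaces the per-index computation of the powers 2**i and 2**(N-1-i) by a Horner-scheme recurrence ans = (2*ans + S[N-1-k] - S[k]) % MOD over zip(reversed(A), A): no exponentiation at all, using the identity sum_i (2^i - 2^(N-1-i))*S[i] = sum_i 2^i*(S[i] - S[N-1-i]) evaluated as a polynomial in 2 from the top coefficient down.
import Mathlib
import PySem

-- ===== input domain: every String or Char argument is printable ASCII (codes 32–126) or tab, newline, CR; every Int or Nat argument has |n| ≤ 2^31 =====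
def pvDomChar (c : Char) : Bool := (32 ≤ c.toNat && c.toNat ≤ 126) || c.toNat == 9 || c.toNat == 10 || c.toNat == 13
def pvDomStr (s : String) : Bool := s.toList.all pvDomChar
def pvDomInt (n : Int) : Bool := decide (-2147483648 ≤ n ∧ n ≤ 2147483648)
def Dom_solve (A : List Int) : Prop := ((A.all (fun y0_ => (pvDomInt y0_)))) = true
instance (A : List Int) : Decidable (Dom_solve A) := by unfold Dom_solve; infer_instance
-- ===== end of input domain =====

-- B replaces the per-index powers 2**i by a Horner recurrence ans = (2*ans + hi - lo) % MOD over zip(reversed(A), A);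
-- equivalence is about the RETURN value: both Pythons sort the argument in place.

-- ===== PORT A =====
def solve (A : List Int) : Int :=
  let MOD : Int := 10 ^ 9 + 7
  let N : Int := (A.length : Int)
  let S := PySem.List.sorted A (fun x => x)
  (PySem.List.pyRange 0 N 1).foldl
    (fun ans i =>
      let num := PySem.List.pyGetD S i 0
      let max_in := PySem.Int.mod (2 ^ i.toNat) MOD
      let min_in := PySem.Int.mod (2 ^ (N - 1 - i).toNat) MOD
      PySem.Int.mod (ans + (max_in - min_in) * num) MOD) 0

-- ===== PORT B =====
def solve_alt (A : List Int) : Int :=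
  let M : Int := 10 ^ 9 + 7
  let S := PySem.List.sorted A (fun x => x)
  (List.zip S.reverse S).foldl (fun ans p => PySem.Int.mod (2 * ans + p.1 - p.2) M) 0

-- ===== PRECONDITION & SPEC =====
def Spec_solve (A : List Int) (out : Int) : Prop := out = solve_alt A
instance (A : List Int) (out : Int) : Decidable (Spec_solve A out) := by unfold Spec_solve; infer_instance

-- ===== CLAIM (what is proved, stated in full; the proofs are below) =====
def Claim_equal_solve : Prop := ∀ (A : List Int), Dom_solve A → Spec_solve A (solve A)

-- ===== LEMMAS AND PROOFS =====

-- the i-th term of A's sum, without the inner mods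
def pvW (S : List Int) (i : Nat) : Int :=
  ((2 : Int) ^ i - 2 ^ (S.length - 1 - i)) * S.getD i 0

-- the polynomial value of a coefficient list, highest coefficient first
def pvPoly : List Int → Int
  | [] => 0
  | c :: t => c * 2 ^ t.length + pvPoly t

lemma pv_mod_coeff (a b c M : Int) : ((a % M - b % M) * c) % M = ((a - b) * c) % M := by
  conv_lhs => rw [Int.mul_emod]
  conv_rhs => rw [Int.mul_emod]
  rw [Int.sub_emod, Int.emod_emod_of_dvd _ dvd_rfl, Int.emod_emod_of_dvd _ dvd_rfl, ← Int.sub_emod]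

lemma pv_foldl_mod_range (M : Int) (t u : Nat → Int) (n : Nat)
    (h : ∀ i, i < n → t i % M = u i % M) :
    (List.range n).foldl (fun a i => (a + t i) % M) 0 = (∑ i ∈ Finset.range n, u i) % M := by
  induction n with
  | zero => simp
  | succ n ih =>
    rw [List.range_succ, List.foldl_append, ih (fun i hi => h i (by omega))]
    rw [Finset.sum_range_succ]
    show ((∑ i ∈ Finset.range n, u i) % M + t n) % M = _
    rw [Int.emod_add_emod, Int.add_emod, h n (by omega), ← Int.add_emod]

lemma pv_solve_eq_sum (A : List Int) :
    solve A = (∑ i ∈ Finset.range (PySem.List.sorted A (fun x => x)).length,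
        pvW (PySem.List.sorted A (fun x => x)) i) % (10 ^ 9 + 7) := by
  unfold solve
  set S := PySem.List.sorted A (fun x => x) with hS
  have hlen : S.length = A.length := PySem.List.length_sorted A (fun x => x) false
  simp only [PySem.List.pyRange_one, Int.sub_zero, Int.toNat_natCast, List.foldl_map, zero_add,
    PySem.Int.mod_eq_emod_of_pos (by norm_num : (0:Int) < 10 ^ 9 + 7)]
  rw [← hlen]
  exact pv_foldl_mod_range (10 ^ 9 + 7)
    (fun k => ((2 : Int) ^ k % (10^9+7) - 2 ^ (((S.length : Int)) - 1 - (k : Int)).toNat % (10^9+7)) * PySem.List.pyGetD S (k : Int) 0)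
    (fun i => pvW S i) S.length
    (by
      intro i hi
      have h2 : (((S.length : Int)) - 1 - (i : Int)).toNat = S.length - 1 - i := by omega
      simp only []
      rw [h2, PySem.List.pyGetD_natCast, pv_mod_coeff]
      rfl)

-- Horner: the fold with acc ↦ (2·acc + c) % M evaluates the polynomial of the list mod M
lemma pv_horner (M : Int) (hM : 0 < M) (L : List Int) :
    ∀ a : Int, L.foldl (fun acc c => PySem.Int.mod (2 * acc + c) M) (a % M)
      = (a * 2 ^ L.length + pvPoly L) % M := by
  induction L with
  | nil => intro a; simp [pvPoly]
  | cons c t ih =>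
    intro a
    show t.foldl _ (PySem.Int.mod (2 * (a % M) + c) M) = _
    have h1 : PySem.Int.mod (2 * (a % M) + c) M = (2 * a + c) % M := by
      rw [PySem.Int.mod_eq_emod_of_pos hM]
      conv_lhs => rw [Int.add_emod, Int.mul_emod, Int.emod_emod_of_dvd _ dvd_rfl,
        ← Int.mul_emod, ← Int.add_emod]
    rw [h1, ih (2 * a + c)]
    congr 1
    show (2 * a + c) * 2 ^ t.length + pvPoly t = a * 2 ^ (c :: t).length + (c * 2 ^ t.length + pvPoly t)
    rw [List.length_cons]
    ring

lemma pv_poly_eq_sum (L : List Int) :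
    pvPoly L = ∑ k ∈ Finset.range L.length, 2 ^ (L.length - 1 - k) * L.getD k 0 := by
  induction L with
  | nil => simp [pvPoly]
  | cons c t ih =>
    rw [List.length_cons, Finset.sum_range_succ']
    simp only [List.getD_cons_succ, List.getD_cons_zero, Nat.add_sub_cancel]
    calc pvPoly (c :: t) = pvPoly t + 2 ^ t.length * c := by rw [pvPoly]; ring
      _ = _ := by
        rw [ih]
        congr 1
        exact Finset.sum_congr rfl (fun i _ => by rw [show t.length - (i + 1) = t.length - 1 - i from by omega])

lemma pv_solve_alt_eq_sum (A : List Int) :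
    solve_alt A = (∑ k ∈ Finset.range (PySem.List.sorted A (fun x => x)).length,
        2 ^ ((PySem.List.sorted A (fun x => x)).length - 1 - k) *
          ((PySem.List.sorted A (fun x => x)).getD ((PySem.List.sorted A (fun x => x)).length - 1 - k) 0
            - (PySem.List.sorted A (fun x => x)).getD k 0)) % (10 ^ 9 + 7) := by
  unfold solve_alt
  set S := PySem.List.sorted A (fun x => x) with hS
  set M : Int := 10 ^ 9 + 7 with hM
  set L : List Int := (List.zip S.reverse S).map (fun p => p.1 - p.2) with hL
  have hfold : (List.zip S.reverse S).foldl (fun ans p => PySem.Int.mod (2 * ans + p.1 - p.2) M) 0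
      = L.foldl (fun ans c => PySem.Int.mod (2 * ans + c) M) 0 := by
    rw [hL, List.foldl_map]
    simp only [add_sub_assoc]
  have hlen : L.length = S.length := by simp [hL]
  have h0 : (0 : Int) = 0 % M := by norm_num [hM]
  rw [hfold]
  conv_lhs => rw [h0]
  rw [pv_horner M (by norm_num [hM]) L 0, zero_mul, zero_add, pv_poly_eq_sum, hlen]
  congr 1
  refine Finset.sum_congr rfl (fun k hk => ?_)
  have hk' : k < S.length := Finset.mem_range.mp hk
  have hkL : k < L.length := by omega
  rw [List.getD_eq_getElem L 0 hkL]
  have : L[k] = S.reverse[k]'(by simpa using hk') - S[k] := by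
    simp [hL]
  rw [this, List.getElem_reverse]
  rw [List.getD_eq_getElem S 0 (show S.length - 1 - k < S.length by omega),
    List.getD_eq_getElem S 0 hk']

lemma pv_sum_eq (S : List Int) :
    ∑ i ∈ Finset.range S.length, pvW S i
      = ∑ k ∈ Finset.range S.length,
          2 ^ (S.length - 1 - k) * (S.getD (S.length - 1 - k) 0 - S.getD k 0) := by
  simp only [pvW, sub_mul, mul_sub]
  rw [Finset.sum_sub_distrib, Finset.sum_sub_distrib,
    ← Finset.sum_range_reflect (fun j => (2:Int) ^ j * S.getD j 0) S.length]

-- ===== VERDICT (by name: the statement is the Claim_ definition above) =====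
theorem solve_spec : Claim_equal_solve := by
  intro A _
  unfold Spec_solve
  rw [pv_solve_eq_sum, pv_solve_alt_eq_sum, pv_sum_eq]
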